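-- pv_equiv track=rewrite | github.com/Coderedhydra/comic | app_enhanced.py | _generate_arrangement
-- ===== SOURCE A (Python) =====
-- def _generate_arrangement(rows, cols):
--     """Generate panel arrangement string for given rows and cols"""
--     arrangement = []
--     panel_num = 0
--
--     for r in range(rows):
--         row_str = ""
--         for c in range(cols):
--             row_str += str(panel_num % 10)
--             panel_num += 1
--         arrangement.append(row_str)
--
--     return arrangement
-- ===== SOURCE B (Python) =====
-- def _generate_arrangement(rows, cols):
--     """Generate panel arrangement string for given rows and cols"""
--     if rows <= 0:
--         return []
--     flat = ''.join(str(i % 10) for i in range(rows * cols))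
--     return [flat[r * cols:(r + 1) * cols] for r in range(rows)]
-- ===== Notes on version B (the rewrite author's own statement) =====
-- stated objective: alternative
-- what changed: Replaces the nested loop with an explicit panel_num accumulator by a two-phase decomposition: build one flat digit string for all rows*cols panels in a single pass, then reshape it into rows by slicing.
import Mathlib
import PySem

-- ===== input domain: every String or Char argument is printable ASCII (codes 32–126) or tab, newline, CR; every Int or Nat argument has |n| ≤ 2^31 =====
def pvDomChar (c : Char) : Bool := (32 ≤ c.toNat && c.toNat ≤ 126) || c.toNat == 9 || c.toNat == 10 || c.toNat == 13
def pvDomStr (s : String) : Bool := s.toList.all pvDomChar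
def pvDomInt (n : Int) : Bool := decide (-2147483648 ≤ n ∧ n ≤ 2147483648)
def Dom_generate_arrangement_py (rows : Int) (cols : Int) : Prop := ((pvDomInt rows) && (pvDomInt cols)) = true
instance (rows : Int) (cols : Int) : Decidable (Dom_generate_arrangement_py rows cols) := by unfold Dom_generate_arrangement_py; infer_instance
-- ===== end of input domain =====

-- B replaces A's nested build-up loop with a two-phase decomposition (one flat digit string, then
-- reshaping by slicing); objective: alternative structure, same cost.

-- ===== PORT A =====
def generate_arrangement_py (rows : Int) (cols : Int) : List String :=
  -- arrangement = [], panel_num = 0; nested for-loops building each row string by +=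
  let st := (PySem.List.pyRange 0 rows 1).foldl
    (fun (st : List String × Int) _r =>
      let row := (PySem.List.pyRange 0 cols 1).foldl
        (fun (rs : String × Int) _c =>
          (rs.1 ++ PySem.Int.toStr (PySem.Int.mod rs.2 10), rs.2 + 1))
        ("", st.2)
      (st.1 ++ [row.1], row.2))
    ([], 0)
  st.1

-- ===== PORT B =====
def generate_arrangement_py_alt (rows : Int) (cols : Int) : List String :=
  -- if rows <= 0: return []
  if rows ≤ 0 then [] else
  -- flat = ''.join(str(i % 10) for i in range(rows * cols))
  let flat := PySem.Str.join ""
    ((PySem.List.pyRange 0 (rows * cols) 1).map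
      (fun i => PySem.Int.toStr (PySem.Int.mod i 10)))
  -- [flat[r*cols:(r+1)*cols] for r in range(rows)]
  (PySem.List.pyRange 0 rows 1).map
    (fun r => PySem.Str.slice flat (some (r * cols)) (some ((r + 1) * cols)))

-- ===== PRECONDITION & SPEC =====
def Spec_generate_arrangement_py (rows : Int) (cols : Int) (out : List String) : Prop := out = generate_arrangement_py_alt rows cols
instance (rows : Int) (cols : Int) (out : List String) : Decidable (Spec_generate_arrangement_py rows cols out) := by unfold Spec_generate_arrangement_py; infer_instance

-- ===== CLAIM (what is proved, stated in full; the proofs are below) =====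
def Claim_equal_generate_arrangement_py : Prop := ∀ (rows : Int) (cols : Int), Dom_generate_arrangement_py rows cols → Spec_generate_arrangement_py rows cols (generate_arrangement_py rows cols)

-- ===== LEMMAS AND PROOFS =====

/-- The digit character Python's `str(k % 10)` produces for a nonnegative count `k`. -/
def pvDig (k : Nat) : Char := Char.ofNat (48 + k % 10)

lemma pvMod10 (k : Nat) : PySem.Int.mod (k : Int) 10 = ((k % 10 : Nat) : Int) := by
  simp [PySem.Int.mod, Int.fmod_eq_emod]

lemma pvToCharsEmod (k : Nat) :
    PySem.Int.toChars ((k : Int) % 10) = [pvDig k] := by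
  have h : ((k : Int) % 10) = ((k % 10 : Nat) : Int) := by push_cast; ring
  rw [h]
  simp only [pvDig]
  have h10 : k % 10 < 10 := Nat.mod_lt _ (by omega)
  interval_cases h2 : k % 10 <;> rfl

lemma pvToChars (k : Nat) :
    PySem.Int.toChars (PySem.Int.mod (k : Int) 10) = [pvDig k] := by
  rw [pvMod10]
  simp only [pvDig]
  have h10 : k % 10 < 10 := Nat.mod_lt _ (by omega)
  interval_cases h : k % 10 <;> rfl

/-- A's inner loop, second component: the panel counter advances by the number of columns. -/
lemma pvInnerSnd (l : List Int) : ∀ (acc : String) (pn : Nat),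
    (l.foldl (fun (rs : String × Int) _c =>
        (rs.1 ++ PySem.Int.toStr (PySem.Int.mod rs.2 10), rs.2 + 1)) (acc, (pn : Int))).2
      = ((pn + l.length : Nat) : Int) := by
  induction l with
  | nil => intro acc pn; simp
  | cons x t ih =>
      intro acc pn
      simp only [List.foldl_cons]
      have hc : ((pn : Int) + 1) = ((pn + 1 : Nat) : Int) := by push_cast; ring
      rw [hc, ih]
      simp only [List.length_cons]; push_cast; ring

/-- A's inner loop, first component: the row string accumulates the digits of `pn, pn+1, …`. -/
lemma pvInnerFst (l : List Int) : ∀ (acc : String) (pn : Nat),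
    ((l.foldl (fun (rs : String × Int) _c =>
        (rs.1 ++ PySem.Int.toStr (PySem.Int.mod rs.2 10), rs.2 + 1)) (acc, (pn : Int))).1).toList
      = acc.toList ++ (List.range l.length).map (fun c => pvDig (pn + c)) := by
  induction l with
  | nil => intro acc pn; simp
  | cons x t ih =>
      intro acc pn
      simp only [List.foldl_cons]
      have hc : ((pn : Int) + 1) = ((pn + 1 : Nat) : Int) := by push_cast; ring
      rw [hc, ih]
      simp [PySem.Int.toList_toStr, pvToCharsEmod, List.range_succ_eq_map, List.map_map,
        Function.comp_def, Nat.add_comm, Nat.add_left_comm]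

/-- The row string A builds starting at panel number `pn`. -/
def pvRow (cols : Int) (pn : Nat) : String :=
  ((PySem.List.pyRange 0 cols 1).foldl
      (fun (rs : String × Int) _c =>
        (rs.1 ++ PySem.Int.toStr (PySem.Int.mod rs.2 10), rs.2 + 1))
      ("", (pn : Int))).1

lemma pvRow_toList (cols : Int) (pn : Nat) :
    (pvRow cols pn).toList = (List.range cols.toNat).map (fun c => pvDig (pn + c)) := by
  unfold pvRow
  rw [pvInnerFst]
  simp [PySem.List.length_pyRange_one]

/-- A's outer loop appends one `pvRow` per iteration, the counter stepping by `cols.toNat`. -/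
lemma pvOuter (cols : Int) (l : List Int) : ∀ (acc : List String) (pn : Nat),
    (l.foldl (fun (st : List String × Int) _r =>
        let row := (PySem.List.pyRange 0 cols 1).foldl
          (fun (rs : String × Int) _c =>
            (rs.1 ++ PySem.Int.toStr (PySem.Int.mod rs.2 10), rs.2 + 1))
          ("", st.2)
        (st.1 ++ [row.1], row.2)) (acc, (pn : Nat))).1
      = acc ++ (List.range l.length).map (fun r => pvRow cols (pn + r * cols.toNat)) := by
  induction l with
  | nil => intro acc pn; simp
  | cons x t ih =>
      intro acc pn
      simp only [List.foldl_cons]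
      rw [pvInnerSnd]
      have hrow : ((PySem.List.pyRange 0 cols 1).foldl
          (fun (rs : String × Int) _c =>
            (rs.1 ++ PySem.Int.toStr (PySem.Int.mod rs.2 10), rs.2 + 1))
          ("", (pn : Int))).1 = pvRow cols pn := rfl
      rw [hrow, ih]
      rw [List.length_cons, List.range_succ_eq_map, List.map_cons, List.map_map]
      simp only [Nat.zero_mul, Nat.add_zero, List.append_assoc, List.singleton_append,
        Function.comp_def, PySem.List.length_pyRange_one, Int.sub_zero]
      congr 2
      exact List.map_congr_left (fun r _ => by congr 1; rw [Nat.succ_mul]; omega)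

/-- A computes one `pvRow` per row, row `r` starting at panel `r * cols.toNat`. -/
lemma pvA_eq (rows cols : Int) :
    generate_arrangement_py rows cols
      = (List.range rows.toNat).map (fun r => pvRow cols (r * cols.toNat)) := by
  unfold generate_arrangement_py
  rw [show (([], (0:Int)) : List String × Int) = ([], ((0:Nat) : Int)) from rfl, pvOuter]
  simp [PySem.List.length_pyRange_one]

/-- B's flat string is exactly the digit characters of `0, 1, …, n-1`. -/
lemma pvFlat (n : Int) :
    (PySem.Str.join ""
        ((PySem.List.pyRange 0 n 1).map
          (fun i => PySem.Int.toStr (PySem.Int.mod i 10)))).toList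
      = (List.range n.toNat).map pvDig := by
  simp only [PySem.Str.join]
  rw [PySem.List.pyRange_one]
  simp only [List.map_map, Function.comp_def, Int.sub_zero, PySem.Int.toList_toStr]
  have h1 : (fun k : Nat => PySem.Int.toChars (PySem.Int.mod ((0 : Int) + (k : Int)) 10))
       = fun k : Nat => [pvDig k] := by
    funext k; rw [Int.zero_add]; exact pvToChars k
  have h0 : ("".toList) = ([] : List Char) := rfl
  rw [h1, h0, show (fun k : Nat => [pvDig k]) = (fun c : Char => [c]) ∘ pvDig from rfl,
    ← List.map_map, PySem.Chars.join_nil_singletons]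
  simp

/-- Taking the `k`-th length-`c` chunk out of the flat list of `R*c` mapped values. -/
lemma pvChunk (f : Nat → Char) (R c k : Nat) (hk : k < R) :
    (((List.range (R * c)).map f).drop (k * c)).take c
      = (List.range c).map (fun j => f (k * c + j)) := by
  have hmul : (k + 1) * c ≤ R * c := Nat.mul_le_mul_right c hk
  have h2 : (k + 1) * c = k * c + c := by ring
  apply List.ext_getElem
  · simp only [List.length_take, List.length_drop, List.length_map, List.length_range]
    omega
  · intro i h1 h2
    simp

theorem generate_arrangement_py_spec_aux (rows cols : Int) :
    generate_arrangement_py rows cols = generate_arrangement_py_alt rows cols := by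
  rw [pvA_eq]
  rcases em (rows ≤ 0) with hr | hr
  · have : rows.toNat = 0 := Int.toNat_of_nonpos hr
    simp [generate_arrangement_py_alt, hr, this]
  rw [show generate_arrangement_py_alt rows cols = (if rows ≤ 0 then [] else
      (PySem.List.pyRange 0 rows 1).map
        (fun r => PySem.Str.slice
          (PySem.Str.join ""
            ((PySem.List.pyRange 0 (rows * cols) 1).map
              (fun i => PySem.Int.toStr (PySem.Int.mod i 10))))
          (some (r * cols)) (some ((r + 1) * cols)))) from rfl, if_neg hr]
  show _ = (PySem.List.pyRange 0 rows 1).map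
    (fun r => PySem.Str.slice
      (PySem.Str.join ""
        ((PySem.List.pyRange 0 (rows * cols) 1).map
          (fun i => PySem.Int.toStr (PySem.Int.mod i 10))))
      (some (r * cols)) (some ((r + 1) * cols)))
  rw [PySem.List.pyRange_one 0 rows]
  simp only [List.map_map, Function.comp_def, Int.sub_zero]
  apply List.map_congr_left
  intro k hk
  rw [List.mem_range] at hk
  apply String.toList_inj.mp
  rw [pvRow_toList]
  rcases em (cols ≤ 0) with hc | hc
  <;> [skip; replace hc : (0:Int) < cols := by omega]
  · -- cols ≤ 0 : the flat string is empty and every row is the empty string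
    have hrows : (0 : Int) < rows := by omega
    have hn : rows * cols ≤ 0 := mul_nonpos_of_nonneg_of_nonpos hrows.le hc
    have hnil : PySem.List.pyRange 0 (rows * cols) 1 = [] :=
      PySem.List.pyRange_one_eq_nil hn
    have hc0 : cols.toNat = 0 := Int.toNat_of_nonpos hc
    rw [hnil, hc0]
    simp [PySem.Str.join, PySem.List.slice]
  · -- cols > 0 : the slice cuts exactly the k-th chunk of cols digits
    have hrows : (0 : Int) < rows := by omega
    obtain ⟨R, rfl⟩ := Int.eq_ofNat_of_zero_le hrows.le
    obtain ⟨c, rfl⟩ := Int.eq_ofNat_of_zero_le hc.le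
    rw [Int.toNat_natCast] at hk
    have e1 : ((0 : Int) + (k : Int)) * (c : Int) = ((k * c : Nat) : Int) := by push_cast; ring
    have e2 : ((0 : Int) + (k : Int) + 1) * (c : Int) = (((k + 1) * c : Nat) : Int) := by
      push_cast; ring
    have hfl : (PySem.Str.join ""
        ((PySem.List.pyRange 0 ((R : Int) * (c : Int)) 1).map
          (fun i => PySem.Int.toStr (PySem.Int.mod i 10)))).toList
        = (List.range (R * c)).map pvDig := by
      rw [pvFlat, ← Nat.cast_mul, Int.toNat_natCast]
    have e3 : (k + 1) * c - k * c = c := by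
      have : (k + 1) * c = k * c + c := by ring
      omega
    rw [e1, e2]
    simp only [PySem.Str.toList_slice, PySem.Chars.slice_eq_listSlice, hfl,
      PySem.List.slice_natCast, e3]
    rw [pvChunk pvDig R c k hk]
    simp [Int.toNat_natCast]

-- ===== VERDICT (by name: the statement is the Claim_ definition above) =====
theorem generate_arrangement_py_spec : Claim_equal_generate_arrangement_py := by
  intro rows cols _
  unfold Spec_generate_arrangement_py
  exact generate_arrangement_py_spec_aux rows cols
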